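-- pv_equiv track=rewrite | github.com/ropalev/AI-Performance-Engineering-2026 | helpers.py | build_tree_text
-- ===== SOURCE A (Python) =====
-- def build_tree_text(items: list) -> str:
--     dirs_added: set[str] = set()
--     lines: list[str] = []
--
--     for item in sorted(items, key=lambda x: x["path"]):
--         parts = item["path"].split("/")
--         for depth, part in enumerate(parts[:-1]):
--             dir_path = "/".join(parts[: depth + 1])
--             if dir_path not in dirs_added:
--                 dirs_added.add(dir_path)
--                 lines.append("  " * depth + part + "/")
--         if item["type"] == "blob":
--             lines.append("  " * (len(parts) - 1) + parts[-1])
--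
--     return "\n".join(lines[:400])
-- ===== SOURCE B (Python) =====
-- def _cpl(a, b):
--     if a and b and a[0] == b[0]:
--         return 1 + _cpl(a[1:], b[1:])
--     return 0
--
--
-- def build_tree_text(items: list) -> str:
--     lines: list[str] = []
--     prev_dirs: list[str] = []
--     for item in sorted(items, key=lambda x: x["path"]):
--         parts = item["path"].split("/")
--         dirs = parts[:-1]
--         c = _cpl(prev_dirs, dirs)
--         for depth in range(c, len(dirs)):
--             lines.append("  " * depth + dirs[depth] + "/")
--         if item["type"] == "blob":
--             lines.append("  " * (len(parts) - 1) + parts[-1])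
--         prev_dirs = dirs
--     return "\n".join(lines[:400])
-- ===== Notes on version B (the rewrite author's own statement) =====
-- stated objective: alternative
-- what changed: Replaces A's global seen-directories string set (rebuilding and hashing every '/'-joined prefix of every path) with a single variable holding the previous item's directory components: since the list is sorted by full path, a directory was already emitted iff it is a common prefix of the immediately preceding path, so B emits exactly the directory lines beyond the common-prefix length.
import Mathlib
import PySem

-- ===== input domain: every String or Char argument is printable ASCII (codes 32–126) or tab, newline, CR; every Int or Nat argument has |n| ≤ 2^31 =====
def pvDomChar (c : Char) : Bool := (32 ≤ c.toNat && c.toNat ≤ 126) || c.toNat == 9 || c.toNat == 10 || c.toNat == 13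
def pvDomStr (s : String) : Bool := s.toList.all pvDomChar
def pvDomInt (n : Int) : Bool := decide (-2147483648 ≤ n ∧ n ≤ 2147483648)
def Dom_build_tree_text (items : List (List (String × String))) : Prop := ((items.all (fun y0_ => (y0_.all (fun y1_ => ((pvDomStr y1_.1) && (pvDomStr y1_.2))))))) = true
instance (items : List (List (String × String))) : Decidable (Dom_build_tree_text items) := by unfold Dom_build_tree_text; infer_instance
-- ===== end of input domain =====

-- B replaces A's global seen-directories set by a common-prefix comparison with the
-- previous (sorted) item's directory components; same output, no speed claim.
-- Strings are handled at the `List Char` level (PySem.Chars), exact for this code.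

-- ===== PORT A =====

-- item["path"]: total via getD; Pre_ requires the key to be present
-- (Python raises KeyError otherwise), so the default is never used on admitted inputs.
def pvPathA (item : List (String × String)) : List Char :=
  ((PySem.Dict.mk item).getD "path" "").toList

-- body of A's inner `for depth, part in enumerate(parts[:-1])` loop
def pvDirStepA (parts : List (List Char)) (st : PySem.Set (List Char) × List (List Char))
    (dp : Int × List Char) : PySem.Set (List Char) × List (List Char) :=
  let dir_path := PySem.Chars.join ['/'] (PySem.List.slice parts none (some (dp.1 + 1)))
  if dir_path ∈ st.1 then st
  else (st.1.add dir_path,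
        st.2 ++ [PySem.List.pyRepeat [' ', ' '] dp.1 ++ dp.2 ++ ['/']])

-- one step of A's outer loop: state = (dirs_added, lines)
def pvStepA (st : PySem.Set (List Char) × List (List Char)) (item : List (String × String)) :
    PySem.Set (List Char) × List (List Char) :=
  let parts := PySem.Chars.splitOn (pvPathA item) ['/']
  let st1 := (PySem.List.enumerate (PySem.List.slice parts none (some (-1)))).foldl
    (pvDirStepA parts) st
  if (PySem.Dict.mk item).getD "type" "" == "blob" then
    (st1.1, st1.2 ++ [PySem.List.pyRepeat [' ', ' '] ((parts.length : Int) - 1) ++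
                      PySem.List.pyGetD parts (-1) []])
  else st1

def build_tree_text (items : List (List (String × String))) : String :=
  let sortedItems := PySem.List.sorted items (fun x => (PySem.Dict.mk x).getD "path" "")
  let res := sortedItems.foldl pvStepA (PySem.Set.ofList [], [])
  String.ofList (PySem.Chars.join ['\n'] (PySem.List.slice res.2 none (some 400)))

-- ===== PORT B =====

-- port of Source B's _cpl (length of the common prefix of two component lists)
def pvCpl : List (List Char) → List (List Char) → Nat
  | x :: a, y :: b => if x == y then pvCpl a b + 1 else 0
  | _, _ => 0

-- one step of B's loop: state = (prev_dirs, lines)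
def pvStepB (st : List (List Char) × List (List Char)) (item : List (String × String)) :
    List (List Char) × List (List Char) :=
  let parts := PySem.Chars.splitOn ((PySem.Dict.mk item).getD "path" "").toList ['/']
  let dirs := PySem.List.slice parts none (some (-1))
  let c := pvCpl st.1 dirs
  let lines := (PySem.List.pyRange (c : Int) (dirs.length : Int) 1).foldl
    (fun lines depth =>
      lines ++ [PySem.List.pyRepeat [' ', ' '] depth ++ PySem.List.pyGetD dirs depth [] ++ ['/']])
    st.2
  let lines := if (PySem.Dict.mk item).getD "type" "" == "blob" then
      lines ++ [PySem.List.pyRepeat [' ', ' '] ((parts.length : Int) - 1) ++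
                PySem.List.pyGetD parts (-1) []]
    else lines
  (dirs, lines)

def build_tree_text_alt (items : List (List (String × String))) : String :=
  let sortedItems := PySem.List.sorted items (fun x => (PySem.Dict.mk x).getD "path" "")
  let res := sortedItems.foldl pvStepB ([], [])
  String.ofList (PySem.Chars.join ['\n'] (PySem.List.slice res.2 none (some 400)))

-- ===== PRECONDITION & SPEC =====

-- Pre_ excludes exactly the items lacking a "path" or "type" key, on which
-- Python's item["path"] / item["type"] raises KeyError.
def Pre_build_tree_text (items : List (List (String × String))) : Prop :=
  ∀ item ∈ items, "path" ∈ (PySem.Dict.mk item).keys ∧ "type" ∈ (PySem.Dict.mk item).keys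
instance (items : List (List (String × String))) : Decidable (Pre_build_tree_text items) := by
  unfold Pre_build_tree_text; infer_instance

def pvWitness_build_tree_text : (List (List (String × String))) :=
  [[("path", "a/b.txt"), ("type", "blob")], [("path", "a"), ("type", "tree")]]

def Spec_build_tree_text (items : List (List (String × String))) (out : String) : Prop := out = build_tree_text_alt items
instance (items : List (List (String × String))) (out : String) : Decidable (Spec_build_tree_text items out) := by unfold Spec_build_tree_text; infer_instance

-- ===== CLAIM (what is proved, stated in full; the proofs are below) =====
def Claim_equal_build_tree_text : Prop := ∀ (items : List (List (String × String))), Dom_build_tree_text items → Pre_build_tree_text items → Spec_build_tree_text items (build_tree_text items)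

-- ===== LEMMAS AND PROOFS =====

-- (a) bridge PySem.Chars.splitOn to Mathlib's List.splitOn
theorem pvGo_eq : ∀ (fuel : Nat) (l cur : List Char) (acc : List (List Char)), l.length < fuel →
    PySem.Chars.splitOn.go ['/'] fuel l cur acc =
      acc.reverse ++ (l.splitOn '/').modifyHead (cur.reverse ++ ·) := by
  intro fuel
  induction fuel with
  | zero => intro l cur acc h; omega
  | succ n ih =>
    intro l cur acc h
    cases l with
    | nil => simp [PySem.Chars.splitOn.go, List.splitOn]
    | cons c rest =>
      by_cases hc : c = '/'
      · subst hc
        have hpre : List.isPrefixOf ['/'] ('/' :: rest) = true := by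
          simp [List.isPrefixOf]
        rw [PySem.Chars.splitOn.go]
        simp only [hpre, if_pos]
        rw [ih _ _ _ (by simp at h ⊢; omega)]
        simp [List.splitOn, show (fun x : List Char => x) = id from rfl]
      · have hpre : List.isPrefixOf ['/'] (c :: rest) = false := by
          simp [List.isPrefixOf]; exact fun h => absurd h.symm hc
        rw [PySem.Chars.splitOn.go]
        simp only [hpre]
        rw [if_neg (by simp)]
        rw [ih _ _ _ (by simp at h ⊢; omega)]
        have hne := List.splitOnP_ne_nil (fun a => a == '/') rest
        cases hsp : rest.splitOn '/' with
        | nil => exact absurd hsp hne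
        | cons a t =>
          simp [List.splitOn, hc] at *
          simp [hsp]

theorem pvSplitOn_eq (p : List Char) :
    PySem.Chars.splitOn p ['/'] = p.splitOn '/' := by
  rw [PySem.Chars.splitOn, pvGo_eq _ _ _ _ (by omega)]
  have hne := List.splitOnP_ne_nil (fun a => a == '/') p
  cases hsp : p.splitOn '/' with
  | nil => exact absurd hsp hne
  | cons a t => simp

theorem pvSplit_ne_nil (p : List Char) : p.splitOn '/' ≠ [] :=
  List.splitOnP_ne_nil _ p

-- elements produced by splitOn contain no separator
theorem pvMem_splitOn (p : List Char) (x : List Char) (hx : x ∈ p.splitOn '/') : '/' ∉ x := by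
  induction p generalizing x with
  | nil => simp [List.splitOn] at hx; simp [hx]
  | cons c rest ih =>
    rw [List.splitOn, List.splitOnP_cons] at hx
    by_cases hc : c = '/'
    · simp only [hc, beq_self_eq_true, if_pos] at hx
      rcases List.mem_cons.mp hx with rfl | hx
      · simp
      · exact ih x hx
    · simp only [beq_iff_eq, hc, if_false] at hx
      have hne := List.splitOnP_ne_nil (fun a => a == '/') rest
      cases hsp : rest.splitOn '/' with
      | nil => exact absurd hsp hne
      | cons a t =>
        rw [List.splitOn] at hsp
        rw [hsp] at hx
        simp only [List.modifyHead_cons, List.mem_cons] at hx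
        rcases hx with rfl | hx
        · intro hm
          rcases List.mem_cons.mp hm with h1 | h1
          · exact hc h1.symm
          · exact ih a (by rw [List.splitOn, hsp]; exact List.mem_cons_self) h1
        · exact ih x (by rw [List.splitOn, hsp]; exact List.mem_cons_of_mem _ hx)

theorem pvSplit_append (a b : List Char) :
    (a ++ '/' :: b).splitOn '/' = a.splitOn '/' ++ b.splitOn '/' :=
  List.splitOnP_append_cons _ a b '/' (by simp)

-- join lemmas (PySem.Chars.join sep = sep.intercalate)
theorem pvJoin_eq (L : List (List Char)) :
    PySem.Chars.join ['/'] L = ['/'].intercalate L := rfl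

theorem pvJoin_cons_cons (x y : List Char) (L : List (List Char)) :
    ['/'].intercalate (x :: y :: L) = x ++ '/' :: ['/'].intercalate (y :: L) := by
  simp [List.intercalate, List.intersperse_cons₂]

theorem pvJoin_append (A B : List (List Char)) (hA : A ≠ []) (hB : B ≠ []) :
    ['/'].intercalate (A ++ B) =
      ['/'].intercalate A ++ '/' :: ['/'].intercalate B := by
  induction A with
  | nil => simp at hA
  | cons x A ih =>
    cases A with
    | nil =>
      cases B with
      | nil => simp at hB
      | cons b B => simp [List.intercalate, List.intersperse_cons₂]
    | cons y A' =>
      simp only [List.cons_append]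
      rw [pvJoin_cons_cons, pvJoin_cons_cons]
      have := ih (by simp)
      simp only [List.cons_append] at this
      rw [this]
      simp

-- (b) prefix joins and their lengths
theorem pvJoin_take_succ (L : List (List Char)) (k : Nat) (hk : k < L.length) (h1 : 1 ≤ k) :
    ['/'].intercalate (L.take (k + 1)) =
      ['/'].intercalate (L.take k) ++ '/' :: L[k] := by
  have htk : L.take k ≠ [] := by
    simp only [ne_eq, List.take_eq_nil_iff, not_or]
    exact ⟨by omega, by intro h; subst h; simp at hk⟩
  rw [List.take_add_one, List.getElem?_eq_getElem hk]
  rw [pvJoin_append _ _ htk (by simp)]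
  simp [List.intercalate]

theorem pvPref_len_lt (L : List (List Char)) (k k' : Nat) (h1 : 1 ≤ k) (hkk : k < k')
    (hk' : k' ≤ L.length) :
    (['/'].intercalate (L.take k)).length < (['/'].intercalate (L.take k')).length := by
  induction k' with
  | zero => omega
  | succ m ih =>
    rcases Nat.lt_or_ge k m.succ with h | h
    · by_cases hm : k = m
      · subst hm
        rw [pvJoin_take_succ L k (by omega) h1]
        simp
      · have := ih (by omega) (by omega)
        rw [pvJoin_take_succ L m (by omega) (by omega)]
        simp; omega
    · omega

theorem pvPref_ne (L : List (List Char)) (k k' : Nat) (h1 : 1 ≤ k) (hkk : k < k')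
    (hk' : k' ≤ L.length) :
    ['/'].intercalate (L.take k) ≠ ['/'].intercalate (L.take k') := by
  intro h
  have := pvPref_len_lt L k k' h1 hkk hk'
  rw [h] at this
  omega

-- (c) common-prefix-length lemmas about pvCpl (Source B's _cpl)

theorem pvCpl_le_left : ∀ (a b : List (List Char)), pvCpl a b ≤ a.length := by
  intro a
  induction a with
  | nil => intro b; cases b <;> simp [pvCpl]
  | cons x a ih =>
    intro b
    cases b with
    | nil => simp [pvCpl]
    | cons y b =>
      by_cases h : x = y <;> simp [pvCpl, h]
      exact ih b

theorem pvCpl_take : ∀ (a b : List (List Char)) (k : Nat), k ≤ pvCpl a b →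
    a.take k = b.take k := by
  intro a
  induction a with
  | nil => intro b k h; cases b <;> simp [pvCpl] at h <;> simp [h]
  | cons x a ih =>
    intro b k h
    cases b with
    | nil => simp [pvCpl] at h; simp [h]
    | cons y b =>
      by_cases hxy : x = y
      · subst hxy
        cases k with
        | zero => simp
        | succ m =>
          simp only [pvCpl, beq_self_eq_true, if_pos] at h
          simp only [List.take_succ_cons, List.cons.injEq, true_and]
          exact ih b m (by omega)
      · simp [pvCpl, hxy] at h; simp [h]

theorem pvLe_cpl : ∀ (a b : List (List Char)) (k : Nat), k ≤ a.length → k ≤ b.length →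
    a.take k = b.take k → k ≤ pvCpl a b := by
  intro a
  induction a with
  | nil => intro b k h _ _; simp at h; omega
  | cons x a ih =>
    intro b k ha hb ht
    cases k with
    | zero => omega
    | succ m =>
      cases b with
      | nil => simp at hb
      | cons y b =>
        simp only [List.take_succ_cons, List.cons.injEq] at ht
        have hxy : x = y := ht.1
        subst hxy
        simp only [pvCpl, beq_self_eq_true, if_pos]
        have := ih b m (by simp at ha; omega) (by simp at hb; omega) ht.2
        omega

-- (d) lexicographic betweenness: strings between two strings with a common
-- prefix share that prefix
theorem pvBetween : ∀ (s x z y : List Char),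
    ¬ List.Lex (· < ·) y (s ++ x) → ¬ List.Lex (· < ·) (s ++ z) y →
    ∃ t, y = s ++ t := by
  intro s
  induction s with
  | nil => intro x z y _ _; exact ⟨y, rfl⟩
  | cons c s' ih =>
    intro x z y h1 h2
    cases y with
    | nil => exact absurd List.Lex.nil h1
    | cons d y' =>
      rcases lt_trichotomy d c with hdc | hdc | hdc
      · exact absurd (List.Lex.rel hdc) h1
      · subst hdc
        have h1' : ¬ List.Lex (· < ·) y' (s' ++ x) := fun hl => h1 (List.Lex.cons hl)
        have h2' : ¬ List.Lex (· < ·) (s' ++ z) y' := fun hl => h2 (List.Lex.cons hl)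
        obtain ⟨t, ht⟩ := ih x z y' h1' h2'
        exact ⟨t, by simp [ht]⟩
      · exact absurd (List.Lex.rel hdc) h2

-- bridge: ≤ on List Char (Mathlib's linear order) vs Lex
theorem pvLe_iff (a b : List Char) : a ≤ b ↔ ¬ List.Lex (· < ·) b a := by
  rw [← not_lt]
  constructor
  · exact fun h => h
  · exact fun h => h

-- (e) the crux: a '/'-joined prefix of the current (largest-so-far) path was
-- emitted before iff it is a common prefix with the immediately preceding path
theorem pvSeen_iff (done : List (List Char)) (seen : PySem.Set (List Char))
    (prev : List (List Char)) (cur : List Char)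
    (hseen : ∀ s, s ∈ seen ↔ ∃ p ∈ done, ∃ k, 0 < k ∧ k < (p.splitOn '/').length ∧
        s = ['/'].intercalate ((p.splitOn '/').take k))
    (hprev : (done = [] ∧ prev = []) ∨
        ∃ q ∈ done, prev = (q.splitOn '/').dropLast ∧ ∀ r ∈ done, r ≤ q)
    (hcur : ∀ p ∈ done, p ≤ cur)
    (d : Nat) (hd : d + 1 < (cur.splitOn '/').length) :
    ['/'].intercalate ((cur.splitOn '/').take (d + 1)) ∈ seen ↔
      d < pvCpl prev ((cur.splitOn '/').dropLast) := by
  have hparts_ne : cur.splitOn '/' ≠ [] := pvSplit_ne_nil cur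
  have hlen_pos : 0 < (cur.splitOn '/').length := List.length_pos_of_ne_nil hparts_ne
  have htake_ne : (cur.splitOn '/').take (d + 1) ≠ [] := by
    simp only [ne_eq, List.take_eq_nil_iff, not_or]
    exact ⟨by omega, hparts_ne⟩
  have hsplit_s : (['/'].intercalate ((cur.splitOn '/').take (d + 1))).splitOn '/' =
      (cur.splitOn '/').take (d + 1) :=
    List.splitOn_intercalate _ '/'
      (fun l hl => pvMem_splitOn cur l (List.mem_of_mem_take hl)) htake_ne
  have hdirs_take : ((cur.splitOn '/').dropLast).take (d + 1) = (cur.splitOn '/').take (d + 1) := by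
    rw [List.dropLast_eq_take, List.take_take]
    congr 1
    omega
  have hcur_decomp : cur = ['/'].intercalate ((cur.splitOn '/').take (d + 1)) ++
      '/' :: ['/'].intercalate ((cur.splitOn '/').drop (d + 1)) := by
    have hdr : (cur.splitOn '/').drop (d + 1) ≠ [] := by
      simp only [ne_eq, List.drop_eq_nil_iff, not_le]
      omega
    calc cur = ['/'].intercalate (cur.splitOn '/') := (List.intercalate_splitOn cur '/').symm
      _ = ['/'].intercalate ((cur.splitOn '/').take (d + 1) ++ (cur.splitOn '/').drop (d + 1)) := by
          rw [List.take_append_drop]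
      _ = _ := pvJoin_append _ _ htake_ne hdr
  constructor
  · intro hmem
    rw [hseen] at hmem
    obtain ⟨p, hp, k, hk0, hkl, hps⟩ := hmem
    have hdone_ne : done ≠ [] := fun h => by subst h; exact absurd hp (by simp)
    rcases hprev with ⟨hd0, _⟩ | ⟨q, hq, hprevq, hqmax⟩
    · exact absurd hd0 hdone_ne
    have hp_decomp : p = ['/'].intercalate ((cur.splitOn '/').take (d + 1)) ++
        '/' :: ['/'].intercalate ((p.splitOn '/').drop k) := by
      have ht1 : (p.splitOn '/').take k ≠ [] := by
        simp only [ne_eq, List.take_eq_nil_iff, not_or]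
        exact ⟨by omega, pvSplit_ne_nil p⟩
      have ht2 : (p.splitOn '/').drop k ≠ [] := by
        simp only [ne_eq, List.drop_eq_nil_iff, not_le]
        omega
      calc p = ['/'].intercalate (p.splitOn '/') := (List.intercalate_splitOn p '/').symm
        _ = ['/'].intercalate ((p.splitOn '/').take k ++ (p.splitOn '/').drop k) := by
            rw [List.take_append_drop]
        _ = ['/'].intercalate ((p.splitOn '/').take k) ++
            '/' :: ['/'].intercalate ((p.splitOn '/').drop k) := pvJoin_append _ _ ht1 ht2
        _ = _ := by rw [← hps]
    obtain ⟨t, hqt⟩ : ∃ t, q = (['/'].intercalate ((cur.splitOn '/').take (d + 1)) ++ ['/']) ++ t := by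
      apply pvBetween _ (['/'].intercalate ((p.splitOn '/').drop k))
          (['/'].intercalate ((cur.splitOn '/').drop (d + 1))) q
      · have := (pvLe_iff p q).mp (hqmax p hp)
        rw [hp_decomp] at this
        simpa using this
      · have := (pvLe_iff q cur).mp (hcur q hq)
        rw [hcur_decomp] at this
        simpa using this
    have hq_split : q.splitOn '/' = (cur.splitOn '/').take (d + 1) ++ t.splitOn '/' := by
      rw [hqt, List.append_assoc, List.singleton_append, pvSplit_append, hsplit_s]
    have hprev_eq : prev = (cur.splitOn '/').take (d + 1) ++ (t.splitOn '/').dropLast := by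
      rw [hprevq, hq_split, List.dropLast_append_of_ne_nil (pvSplit_ne_nil t)]
    have htk_len : ((cur.splitOn '/').take (d + 1)).length = d + 1 := by
      simp
      omega
    have h1 : prev.take (d + 1) = (cur.splitOn '/').take (d + 1) := by
      rw [hprev_eq]
      exact List.take_left' htk_len
    have : d + 1 ≤ pvCpl prev ((cur.splitOn '/').dropLast) := by
      apply pvLe_cpl
      · rw [hprev_eq]
        simp
        omega
      · simp [List.length_dropLast]
        omega
      · rw [h1, hdirs_take]
    omega
  · intro hlt
    have hc_pos : 0 < pvCpl prev ((cur.splitOn '/').dropLast) := by omega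
    have hprev_ne : prev ≠ [] := by
      intro h
      subst h
      have h0 : pvCpl ([] : List (List Char)) ((cur.splitOn '/').dropLast) = 0 := by
        cases (cur.splitOn '/').dropLast <;> rfl
      omega
    rcases hprev with ⟨_, hpnil⟩ | ⟨q, hq, hprevq, _⟩
    · exact absurd hpnil hprev_ne
    have hq_len : (q.splitOn '/').length = prev.length + 1 := by
      rw [hprevq, List.length_dropLast]
      have := List.length_pos_of_ne_nil (pvSplit_ne_nil q)
      omega
    have hcl : pvCpl prev ((cur.splitOn '/').dropLast) ≤ prev.length := pvCpl_le_left _ _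
    rw [hseen]
    refine ⟨q, hq, d + 1, by omega, by omega, ?_⟩
    have h2 : (q.splitOn '/').take (d + 1) = prev.take (d + 1) := by
      rw [hprevq, List.dropLast_eq_take, List.take_take]
      congr 1
      omega
    rw [h2, pvCpl_take prev ((cur.splitOn '/').dropLast) (d + 1) (by omega), hdirs_take]

-- (f) A's inner loop over enumerate(parts[:-1]) characterised
theorem pvInnerA (cur : List Char) (c : Nat) :
    ∀ (ds : List (List Char)) (i : Nat) (seen : PySem.Set (List Char)) (lines : List (List Char)),
    ds = ((cur.splitOn '/').dropLast).drop i →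
    i + ds.length + 1 ≤ (cur.splitOn '/').length →
    (∀ d : Nat, i ≤ d → d < i + ds.length →
      (['/'].intercalate ((cur.splitOn '/').take (d + 1)) ∈ seen ↔ d < c)) →
    ((PySem.List.enumerate ds i).foldl (pvDirStepA (cur.splitOn '/')) (seen, lines)).2 =
      lines ++ (List.range' (max c i) (i + ds.length - max c i)).map
        (fun (d : Nat) => PySem.List.pyRepeat [' ', ' '] (d : Int) ++
          ((cur.splitOn '/').dropLast).getD d [] ++ ['/']) ∧
    (∀ s, s ∈ ((PySem.List.enumerate ds i).foldl (pvDirStepA (cur.splitOn '/')) (seen, lines)).1 ↔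
        s ∈ seen ∨ ∃ k, i < k ∧ k ≤ i + ds.length ∧
          s = ['/'].intercalate ((cur.splitOn '/').take k)) := by
  intro ds
  induction ds with
  | nil =>
    intro i seen lines _ _ _
    refine ⟨by simp [PySem.List.enumerate]; try omega, fun s => by simp [PySem.List.enumerate]; omega⟩
  | cons p rest ih =>
    intro i seen lines hds hlen hwin
    rw [PySem.List.enumerate_cons]
    have hcast2 : ((i : Int) + 1) = ((i + 1 : Nat) : Int) := by push_cast; ring
    rw [hcast2]
    have hstep : pvDirStepA (cur.splitOn '/') (seen, lines) ((i : Int), p) =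
        if ['/'].intercalate ((cur.splitOn '/').take (i + 1)) ∈ seen then (seen, lines)
        else (seen.add (['/'].intercalate ((cur.splitOn '/').take (i + 1))),
              lines ++ [PySem.List.pyRepeat [' ', ' '] (i : Int) ++ p ++ ['/']]) := by
      show (if _ then _ else _) = _
      have hcast : ((i : Int) + 1) = ((i + 1 : Nat) : Int) := by push_cast; ring
      rw [hcast, PySem.List.slice_to_natCast, pvJoin_eq]
    have hdropsucc : ((cur.splitOn '/').dropLast).drop (i + 1) = rest := by
      have := congrArg (List.drop 1) hds
      simpa [List.drop_drop, Nat.add_comm] using this.symm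
    have hp_get : ((cur.splitOn '/').dropLast).getD i [] = p := by
      have h0 : (((cur.splitOn '/').dropLast).drop i)[0]? = some p := by rw [← hds]; rfl
      rw [List.getElem?_drop, Nat.add_zero] at h0
      rw [List.getD_eq_getElem?_getD, h0]
      rfl
    by_cases hic : i < c
    · rw [List.foldl_cons, hstep, if_pos ((hwin i le_rfl (by simp)).mpr hic)]
      obtain ⟨ih2, ih1⟩ := ih (i + 1) seen lines hdropsucc.symm (by simp at hlen ⊢; omega)
        (fun d hd1 hd2 => hwin d (by omega) (by simp at hd2 ⊢; omega))
      constructor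
      · rw [ih2]
        have hr : List.range' (max c (i + 1)) (i + 1 + rest.length - max c (i + 1)) =
            List.range' (max c i) (i + (p :: rest).length - max c i) := by
          have h1 : max c (i + 1) = max c i := by omega
          have h2 : i + 1 + rest.length - max c (i + 1) =
              i + (p :: rest).length - max c i := by
            simp only [List.length_cons]
            omega
          rw [h2, h1]
        rw [hr]
      · intro s
        rw [ih1 s]
        constructor
        · rintro (hs | ⟨k, hk1, hk2, hk3⟩)
          · exact Or.inl hs
          · exact Or.inr ⟨k, by omega, by simp only [List.length_cons]; omega, hk3⟩
        · rintro (hs | ⟨k, hk1, hk2, hk3⟩)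
          · exact Or.inl hs
          · by_cases hk : k = i + 1
            · subst hk
              subst hk3
              exact Or.inl ((hwin i le_rfl (by simp)).mpr hic)
            · exact Or.inr ⟨k, by omega, by simp only [List.length_cons] at hk2 ⊢; omega, hk3⟩
    · rw [List.foldl_cons, hstep, if_neg (fun hm => hic ((hwin i le_rfl (by simp)).mp hm))]
      have hwin' : ∀ d : Nat, i + 1 ≤ d → d < i + 1 + rest.length →
          (['/'].intercalate ((cur.splitOn '/').take (d + 1)) ∈
            seen.add (['/'].intercalate ((cur.splitOn '/').take (i + 1))) ↔ d < c) := by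
        intro d hd1 hd2
        rw [PySem.Set.mem_add]
        constructor
        · rintro (hs | heq)
          · exact (hwin d (by omega) (by simp; omega)).mp hs
          · exfalso
            exact pvPref_ne (cur.splitOn '/') (i + 1) (d + 1) (by omega) (by omega)
              (by simp at hlen ⊢; omega) heq.symm
        · intro hdc
          exact Or.inl ((hwin d (by omega) (by simp; omega)).mpr hdc)
      obtain ⟨ih2, ih1⟩ := ih (i + 1)
        (seen.add (['/'].intercalate ((cur.splitOn '/').take (i + 1))))
        (lines ++ [PySem.List.pyRepeat [' ', ' '] (i : Int) ++ p ++ ['/']])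
        hdropsucc.symm (by simp at hlen ⊢; omega) hwin'
      constructor
      · rw [ih2]
        have h1 : max c (i + 1) = i + 1 := by omega
        have h2 : max c i = i := by omega
        have h3 : i + (p :: rest).length - i = rest.length + 1 := by simp only [List.length_cons]; omega
        rw [h1, h2, h3, List.range'_succ, List.map_cons, hp_get]
        simp
      · intro s
        rw [ih1 s, PySem.Set.mem_add]
        constructor
        · rintro ((hs | heq) | ⟨k, hk1, hk2, hk3⟩)
          · exact Or.inl hs
          · exact Or.inr ⟨i + 1, by omega, by simp only [List.length_cons]; omega, heq⟩
          · exact Or.inr ⟨k, by omega, by simp only [List.length_cons] at hk2 ⊢; omega, hk3⟩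
        · rintro (hs | ⟨k, hk1, hk2, hk3⟩)
          · exact Or.inl (Or.inl hs)
          · by_cases hk : k = i + 1
            · subst hk
              exact Or.inl (Or.inr hk3)
            · exact Or.inr ⟨k, by omega, by simp only [List.length_cons] at hk2 ⊢; omega, hk3⟩

-- (g) B's emission loop over range(c, len(dirs)) as a map
theorem pvEmitB (dirs : List (List Char)) (c : Nat) (lines : List (List Char)) :
    (PySem.List.pyRange (c : Int) (dirs.length : Int) 1).foldl
      (fun lines depth =>
        lines ++ [PySem.List.pyRepeat [' ', ' '] depth ++ PySem.List.pyGetD dirs depth [] ++ ['/']])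
      lines =
    lines ++ (List.range' c (dirs.length - c)).map
      (fun (d : Nat) => PySem.List.pyRepeat [' ', ' '] (d : Int) ++ dirs.getD d [] ++ ['/']) := by
  rw [PySem.List.foldl_append_singleton_eq_map
    (fun depth => PySem.List.pyRepeat [' ', ' '] depth ++ PySem.List.pyGetD dirs depth [] ++ ['/'])]
  congr 1
  rw [PySem.List.pyRange_one, List.map_map, List.range'_eq_map_range, List.map_map]
  have ht : ((dirs.length : Int) - (c : Int)).toNat = dirs.length - c := by omega
  rw [ht]
  apply List.map_congr_left
  intro k _
  have hcast : ((c : Int) + (k : Int)) = ((c + k : Nat) : Int) := by push_cast; ring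
  simp only [Function.comp]
  rw [hcast, PySem.List.pyGetD_natCast]

-- (h) the two outer folds produce the same lines
set_option maxRecDepth 8192 in
theorem pvFold_eq : ∀ (l : List (List (String × String))) (done : List (List Char))
    (seen : PySem.Set (List Char)) (prev : List (List Char)) (lines : List (List Char)),
    l.Pairwise (fun a b => pvPathA a ≤ pvPathA b) →
    (∀ p ∈ done, ∀ it ∈ l, p ≤ pvPathA it) →
    (∀ s, s ∈ seen ↔ ∃ p ∈ done, ∃ k, 0 < k ∧ k < (p.splitOn '/').length ∧
        s = ['/'].intercalate ((p.splitOn '/').take k)) →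
    ((done = [] ∧ prev = []) ∨
        ∃ q ∈ done, prev = (q.splitOn '/').dropLast ∧ ∀ r ∈ done, r ≤ q) →
    (l.foldl pvStepA (seen, lines)).2 = (l.foldl pvStepB (prev, lines)).2 := by
  intro l
  induction l with
  | nil => intro done seen prev lines _ _ _ _; rfl
  | cons it l' ih =>
    intro done seen prev lines hpair hdone hseen hprev
    have hpa : PySem.Chars.splitOn (pvPathA it) ['/'] = (pvPathA it).splitOn '/' :=
      pvSplitOn_eq (pvPathA it)
    have hparts_ne : (pvPathA it).splitOn '/' ≠ [] := pvSplit_ne_nil (pvPathA it)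
    have hlen_pos : 0 < ((pvPathA it).splitOn '/').length := List.length_pos_of_ne_nil hparts_ne
    have hcur : ∀ p ∈ done, p ≤ pvPathA it := fun p hp => hdone p hp it List.mem_cons_self
    have hwin : ∀ d : Nat, 0 ≤ d → d < 0 + (((pvPathA it).splitOn '/').dropLast).length →
        (['/'].intercalate (((pvPathA it).splitOn '/').take (d + 1)) ∈ seen ↔
          d < pvCpl prev (((pvPathA it).splitOn '/').dropLast)) := by
      intro d _ hd
      rw [List.length_dropLast] at hd
      exact pvSeen_iff done seen prev (pvPathA it) hseen hprev hcur d (by omega)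
    obtain ⟨hl2, hmem⟩ := pvInnerA (pvPathA it) (pvCpl prev (((pvPathA it).splitOn '/').dropLast))
      (((pvPathA it).splitOn '/').dropLast) 0 seen lines (by simp)
      (by rw [List.length_dropLast]; omega) hwin
    simp only [Nat.cast_zero] at hl2 hmem
    have hl2' : ((PySem.List.enumerate (((pvPathA it).splitOn '/').dropLast) 0).foldl
        (pvDirStepA ((pvPathA it).splitOn '/')) (seen, lines)).2 =
        lines ++ (List.range' (pvCpl prev (((pvPathA it).splitOn '/').dropLast))
            ((((pvPathA it).splitOn '/').dropLast).length -
              pvCpl prev (((pvPathA it).splitOn '/').dropLast))).map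
          (fun (d : Nat) => PySem.List.pyRepeat [' ', ' '] (d : Int) ++
            (((pvPathA it).splitOn '/').dropLast).getD d [] ++ ['/']) := by
      rw [hl2, Nat.max_zero, Nat.zero_add]
    -- the invariants for the tail of the induction
    have hdone' : ∀ p ∈ done ++ [pvPathA it], ∀ it' ∈ l', p ≤ pvPathA it' := by
      intro p hp it' hit'
      rcases List.mem_append.mp hp with hp | hp
      · exact hdone p hp it' (List.mem_cons_of_mem _ hit')
      · rw [List.mem_singleton.mp hp]
        exact (List.pairwise_cons.mp hpair).1 it' hit'
    have hseen' : ∀ s, s ∈ ((PySem.List.enumerate (((pvPathA it).splitOn '/').dropLast) 0).foldl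
        (pvDirStepA ((pvPathA it).splitOn '/')) (seen, lines)).1 ↔
        ∃ p ∈ done ++ [pvPathA it], ∃ k, 0 < k ∧ k < (p.splitOn '/').length ∧
          s = ['/'].intercalate ((p.splitOn '/').take k) := by
      intro s
      rw [hmem s]
      constructor
      · rintro (hs | ⟨k, hk1, hk2, hk3⟩)
        · obtain ⟨p, hp, k, hk⟩ := (hseen s).mp hs
          exact ⟨p, List.mem_append_left _ hp, k, hk⟩
        · refine ⟨pvPathA it, List.mem_append_right _ List.mem_cons_self, k, by omega, ?_, hk3⟩
          rw [List.length_dropLast] at hk2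
          omega
      · rintro ⟨p, hp, k, hk0, hkl, hk3⟩
        rcases List.mem_append.mp hp with hp | hp
        · exact Or.inl ((hseen s).mpr ⟨p, hp, k, hk0, hkl, hk3⟩)
        · rw [List.mem_singleton.mp hp] at hkl hk3
          refine Or.inr ⟨k, by omega, ?_, hk3⟩
          rw [List.length_dropLast]
          omega
    have hprev' : (done ++ [pvPathA it] = [] ∧ ((pvPathA it).splitOn '/').dropLast = []) ∨
        ∃ q ∈ done ++ [pvPathA it], ((pvPathA it).splitOn '/').dropLast = (q.splitOn '/').dropLast ∧
          ∀ r ∈ done ++ [pvPathA it], r ≤ q := by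
      refine Or.inr ⟨pvPathA it, List.mem_append_right _ List.mem_cons_self, rfl, ?_⟩
      intro r hr
      rcases List.mem_append.mp hr with hr | hr
      · exact hcur r hr
      · rw [List.mem_singleton.mp hr]
    have happly : ∀ nl, (List.foldl pvStepA
        (((PySem.List.enumerate (((pvPathA it).splitOn '/').dropLast) 0).foldl
          (pvDirStepA ((pvPathA it).splitOn '/')) (seen, lines)).1, nl) l').2 =
        (List.foldl pvStepB ((((pvPathA it).splitOn '/').dropLast), nl) l').2 :=
      fun nl => ih (done ++ [pvPathA it]) _ _ nl hpair.of_cons hdone' hseen' hprev'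
    have hb : ((PySem.Dict.mk it).getD "path" "").toList = pvPathA it := rfl
    rw [List.foldl_cons, List.foldl_cons]
    by_cases hty : (((PySem.Dict.mk it).getD "type" "" == "blob") = true)
    · have hA : pvStepA (seen, lines) it =
          (((PySem.List.enumerate (((pvPathA it).splitOn '/').dropLast) 0).foldl
              (pvDirStepA ((pvPathA it).splitOn '/')) (seen, lines)).1,
           (lines ++ (List.range' (pvCpl prev (((pvPathA it).splitOn '/').dropLast))
              ((((pvPathA it).splitOn '/').dropLast).length -
                pvCpl prev (((pvPathA it).splitOn '/').dropLast))).map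
            (fun (d : Nat) => PySem.List.pyRepeat [' ', ' '] (d : Int) ++
              (((pvPathA it).splitOn '/').dropLast).getD d [] ++ ['/'])) ++
           [PySem.List.pyRepeat [' ', ' '] ((((pvPathA it).splitOn '/').length : Int) - 1) ++
              PySem.List.pyGetD ((pvPathA it).splitOn '/') (-1) []]) := by
        simp only [pvStepA, hpa, PySem.List.slice_to_neg_one]
        rw [if_pos hty, hl2']
      have hB : pvStepB (prev, lines) it =
          ((((pvPathA it).splitOn '/').dropLast),
           (lines ++ (List.range' (pvCpl prev (((pvPathA it).splitOn '/').dropLast))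
              ((((pvPathA it).splitOn '/').dropLast).length -
                pvCpl prev (((pvPathA it).splitOn '/').dropLast))).map
            (fun (d : Nat) => PySem.List.pyRepeat [' ', ' '] (d : Int) ++
              (((pvPathA it).splitOn '/').dropLast).getD d [] ++ ['/'])) ++
           [PySem.List.pyRepeat [' ', ' '] ((((pvPathA it).splitOn '/').length : Int) - 1) ++
              PySem.List.pyGetD ((pvPathA it).splitOn '/') (-1) []]) := by
        simp only [pvStepB, hb, hpa, PySem.List.slice_to_neg_one]
        rw [pvEmitB (((pvPathA it).splitOn '/').dropLast)
          (pvCpl prev (((pvPathA it).splitOn '/').dropLast)) lines, if_pos hty]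
      rw [hA, hB]
      exact happly _
    · have hA : pvStepA (seen, lines) it =
          (((PySem.List.enumerate (((pvPathA it).splitOn '/').dropLast) 0).foldl
              (pvDirStepA ((pvPathA it).splitOn '/')) (seen, lines)).1,
           lines ++ (List.range' (pvCpl prev (((pvPathA it).splitOn '/').dropLast))
              ((((pvPathA it).splitOn '/').dropLast).length -
                pvCpl prev (((pvPathA it).splitOn '/').dropLast))).map
            (fun (d : Nat) => PySem.List.pyRepeat [' ', ' '] (d : Int) ++
              (((pvPathA it).splitOn '/').dropLast).getD d [] ++ ['/'])) := by
        simp only [pvStepA, hpa, PySem.List.slice_to_neg_one]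
        rw [if_neg hty, ← hl2']
      have hB : pvStepB (prev, lines) it =
          ((((pvPathA it).splitOn '/').dropLast),
           lines ++ (List.range' (pvCpl prev (((pvPathA it).splitOn '/').dropLast))
              ((((pvPathA it).splitOn '/').dropLast).length -
                pvCpl prev (((pvPathA it).splitOn '/').dropLast))).map
            (fun (d : Nat) => PySem.List.pyRepeat [' ', ' '] (d : Int) ++
              (((pvPathA it).splitOn '/').dropLast).getD d [] ++ ['/'])) := by
        simp only [pvStepB, hb, hpa, PySem.List.slice_to_neg_one]
        rw [pvEmitB (((pvPathA it).splitOn '/').dropLast)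
          (pvCpl prev (((pvPathA it).splitOn '/').dropLast)) lines, if_neg hty]
      rw [hA, hB]
      exact happly _


-- ===== VERDICT (by name: the statement is the Claim_ definition above) =====
theorem build_tree_text_spec : Claim_equal_build_tree_text := by
  unfold Claim_equal_build_tree_text
  intro items _ _
  unfold Spec_build_tree_text
  have hpair : (PySem.List.sorted items
      (fun x => (PySem.Dict.mk x).getD "path" "")).Pairwise
      (fun a b => pvPathA a ≤ pvPathA b) :=
    (PySem.List.sorted_pairwise items (fun x => (PySem.Dict.mk x).getD "path" "")).imp
      (fun hab => String.le_iff_toList_le.mp hab)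
  have h2 := pvFold_eq (PySem.List.sorted items (fun x => (PySem.Dict.mk x).getD "path" ""))
    [] (PySem.Set.ofList []) [] [] hpair (by simp)
    (fun s => by simp) (Or.inl ⟨rfl, rfl⟩)
  show String.ofList (PySem.Chars.join ['\n'] (PySem.List.slice
      ((PySem.List.sorted items (fun x => (PySem.Dict.mk x).getD "path" "")).foldl
        pvStepA (PySem.Set.ofList [], [])).2 none (some 400))) =
    String.ofList (PySem.Chars.join ['\n'] (PySem.List.slice
      ((PySem.List.sorted items (fun x => (PySem.Dict.mk x).getD "path" "")).foldl
        pvStepB ([], [])).2 none (some 400)))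
  rw [h2]
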